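-- pv_equiv track=rewrite | github.com/Bahuncoder/dharmamindv3 | backend/app/spiritual_modules/dharma_module.py | identify_dharmic_conflicts
-- ===== SOURCE A (Python) =====
-- from typing import Dict, List, Any, Optional
--
-- def identify_dharmic_conflicts(query: str) -> List[str]:
--     """Identify potential dharmic conflicts"""
--     conflicts = []
--     query_lower = query.lower()
--
--     if any(word in query_lower for word in ["family", "work", "duty"]):
--         conflicts.append("Conflict between family duty and professional obligations")
--
--     if any(word in query_lower for word in ["truth", "lie", "honest"]):
--         conflicts.append("Tension between absolute truth and compassionate speech")
--
--     if any(word in query_lower for word in ["money", "wealth", "profit"]):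
--         conflicts.append("Balancing material needs with spiritual values")
--
--     if any(word in query_lower for word in ["friend", "loyalty", "relationship"]):
--         conflicts.append("Personal loyalty vs. moral righteousness")
--
--     return conflicts if conflicts else ["Balancing personal desires with dharmic duty"]
-- ===== SOURCE B (Python) =====
-- KEYWORD_GROUPS = [
--     ("family", 0), ("work", 0), ("duty", 0),
--     ("truth", 1), ("lie", 1), ("honest", 1),
--     ("money", 2), ("wealth", 2), ("profit", 2),
--     ("friend", 3), ("loyalty", 3), ("relationship", 3),
-- ]
--
-- MESSAGES = [
--     "Conflict between family duty and professional obligations",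
--     "Tension between absolute truth and compassionate speech",
--     "Balancing material needs with spiritual values",
--     "Personal loyalty vs. moral righteousness",
-- ]
--
-- FALLBACK = "Balancing personal desires with dharmic duty"
--
--
-- def identify_dharmic_conflicts(query: str):
--     """Identify potential dharmic conflicts (single positional scan).
--
--     Instead of searching the query once per keyword, scan the lowered query
--     left to right once; at each position record the group of every keyword
--     that starts there.  A group fires iff one of its keywords occurs
--     somewhere, so this returns exactly the matched messages in table order.
--     """
--     q = query.lower()
--     fired = set()
--     for i in range(len(q)):
--         for kw, g in KEYWORD_GROUPS:
--             if q.startswith(kw, i):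
--                 fired.add(g)
--     conflicts = [msg for g, msg in enumerate(MESSAGES) if g in fired]
--     return conflicts if conflicts else [FALLBACK]
-- ===== Notes on version B (the rewrite author's own statement) =====
-- stated objective: alternative
-- what changed: B scans the lowered query once position by position, recording in a set the group index of every keyword that starts at each position, then emits the messages of fired groups in table order; A instead runs a separate substring search over the query for each of the twelve keywords in four unrolled branches.
import Mathlib
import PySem

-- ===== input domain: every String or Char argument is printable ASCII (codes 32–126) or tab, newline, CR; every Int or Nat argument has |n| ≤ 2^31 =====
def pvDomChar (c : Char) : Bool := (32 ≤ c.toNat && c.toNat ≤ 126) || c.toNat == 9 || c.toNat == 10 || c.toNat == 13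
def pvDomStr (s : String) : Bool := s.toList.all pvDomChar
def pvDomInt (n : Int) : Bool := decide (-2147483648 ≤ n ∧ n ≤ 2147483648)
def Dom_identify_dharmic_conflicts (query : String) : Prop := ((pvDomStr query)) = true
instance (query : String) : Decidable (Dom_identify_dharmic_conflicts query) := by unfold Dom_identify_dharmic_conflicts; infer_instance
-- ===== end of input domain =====

-- B replaces A's twelve per-keyword substring searches by one positional scan of the
-- lowered query that collects fired group indices in a set; objective: alternative.

-- ===== PORT A =====
def identify_dharmic_conflicts (query : String) : List String :=
  let conflicts : List String := []
  let query_lower := PySem.Str.lower query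
  let conflicts := if ["family", "work", "duty"].any (fun w => PySem.Str.isIn w query_lower) then
      conflicts ++ ["Conflict between family duty and professional obligations"] else conflicts
  let conflicts := if ["truth", "lie", "honest"].any (fun w => PySem.Str.isIn w query_lower) then
      conflicts ++ ["Tension between absolute truth and compassionate speech"] else conflicts
  let conflicts := if ["money", "wealth", "profit"].any (fun w => PySem.Str.isIn w query_lower) then
      conflicts ++ ["Balancing material needs with spiritual values"] else conflicts
  let conflicts := if ["friend", "loyalty", "relationship"].any (fun w => PySem.Str.isIn w query_lower) then
      conflicts ++ ["Personal loyalty vs. moral righteousness"] else conflicts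
  if conflicts ≠ [] then conflicts else ["Balancing personal desires with dharmic duty"]

-- ===== PORT B =====
def dharmaKeywordGroups : List (String × Int) :=
  [ ("family", 0), ("work", 0), ("duty", 0),
    ("truth", 1), ("lie", 1), ("honest", 1),
    ("money", 2), ("wealth", 2), ("profit", 2),
    ("friend", 3), ("loyalty", 3), ("relationship", 3) ]

def dharmaMessages : List String :=
  [ "Conflict between family duty and professional obligations",
    "Tension between absolute truth and compassionate speech",
    "Balancing material needs with spiritual values",
    "Personal loyalty vs. moral righteousness" ]

-- q.startswith(kw, i) with 0 ≤ i is ported by hand as a prefix test on the drop at i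
-- (exact: i comes from range(len(q)), so it is nonnegative and .toNat does not clamp).
def identify_dharmic_conflicts_alt (query : String) : List String :=
  let q := PySem.Str.lower query
  let fired : PySem.Set Int :=
    (PySem.List.pyRange 0 (PySem.Str.len q) 1).foldl
      (fun fd i => dharmaKeywordGroups.foldl
        (fun fd p =>
          if PySem.Chars.startswith (q.toList.drop i.toNat) p.1.toList then PySem.Set.add fd p.2 else fd)
        fd)
      PySem.Set.empty
  let conflicts :=
    ((PySem.List.enumerate dharmaMessages 0).filter (fun p => PySem.Set.contains fired p.1)).map (·.2)
  if conflicts.isEmpty then ["Balancing personal desires with dharmic duty"] else conflicts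

-- ===== PRECONDITION & SPEC =====
def Spec_identify_dharmic_conflicts (query : String) (out : List String) : Prop := out = identify_dharmic_conflicts_alt query
instance (query : String) (out : List String) : Decidable (Spec_identify_dharmic_conflicts query out) := by unfold Spec_identify_dharmic_conflicts; infer_instance

-- ===== CLAIM =====
def Claim_equal_identify_dharmic_conflicts : Prop := ∀ (query : String), Dom_identify_dharmic_conflicts query → Spec_identify_dharmic_conflicts query (identify_dharmic_conflicts query)

-- ===== LEMMAS AND PROOFS =====

-- membership after the inner fold over the keyword table
theorem dharma_inner_mem (qL : List Char) (i : Int) (kws : List (String × Int))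
    (fd : PySem.Set Int) (g : Int) :
    g ∈ kws.foldl
      (fun fd p =>
        if PySem.Chars.startswith (qL.drop i.toNat) p.1.toList then PySem.Set.add fd p.2 else fd)
      fd
    ↔ g ∈ fd ∨ ∃ p ∈ kws, PySem.Chars.startswith (qL.drop i.toNat) p.1.toList = true ∧ g = p.2 := by
  induction kws generalizing fd with
  | nil => simp
  | cons hd tl ih =>
    simp only [List.foldl_cons, List.mem_cons]
    rw [ih]
    by_cases h : PySem.Chars.startswith (qL.drop i.toNat) hd.1.toList = true
    · simp [h, PySem.Set.mem_add]; tauto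
    · simp [h]

-- membership after the outer fold over the positions
theorem dharma_outer_mem (qL : List Char) (is : List Int) (fd : PySem.Set Int) (g : Int) :
    g ∈ is.foldl
      (fun fd i => dharmaKeywordGroups.foldl
        (fun fd p =>
          if PySem.Chars.startswith (qL.drop i.toNat) p.1.toList then PySem.Set.add fd p.2 else fd)
        fd)
      fd
    ↔ g ∈ fd ∨ ∃ i ∈ is, ∃ p ∈ dharmaKeywordGroups,
        PySem.Chars.startswith (qL.drop i.toNat) p.1.toList = true ∧ g = p.2 := by
  induction is generalizing fd with
  | nil => simp
  | cons hd tl ih =>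
    simp only [List.foldl_cons, List.mem_cons]
    rw [ih, dharma_inner_mem]
    constructor
    · rintro ((h | ⟨p, hp, hs, hg⟩) | ⟨i, hi, p, hp, hs, hg⟩)
      · exact Or.inl h
      · exact Or.inr ⟨hd, Or.inl rfl, p, hp, hs, hg⟩
      · exact Or.inr ⟨i, Or.inr hi, p, hp, hs, hg⟩
    · rintro (h | ⟨i, (rfl | hi), p, hp, hs, hg⟩)
      · exact Or.inl (Or.inl h)
      · exact Or.inl (Or.inr ⟨p, hp, hs, hg⟩)
      · exact Or.inr ⟨i, hi, p, hp, hs, hg⟩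

-- a nonempty word starts at some scanned position iff it occurs as a substring
theorem dharma_exists_start_iff (qL : List Char) (w : List Char) (hw : w ≠ []) :
    (∃ i ∈ PySem.List.pyRange 0 (qL.length : Int) 1,
        PySem.Chars.startswith (qL.drop i.toNat) w = true)
    ↔ PySem.Chars.isIn w qL = true := by
  rw [← PySem.Chars.exists_prefix_drop_iff_isIn]
  constructor
  · rintro ⟨i, _, hs⟩
    exact ⟨i.toNat, (PySem.Chars.startswith_iff _ _).mp hs⟩
  · rintro ⟨j, hj⟩
    have hjlt : j < qL.length := by
      by_contra hge
      rw [Nat.not_lt] at hge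
      rw [List.drop_eq_nil_of_le hge] at hj
      exact hw (List.prefix_nil.mp hj)
    refine ⟨(j : Int), ?_, ?_⟩
    · rw [PySem.List.mem_pyRange_one]
      exact ⟨Int.natCast_nonneg j, by exact_mod_cast hjlt⟩
    · rw [PySem.Chars.startswith_iff]
      simpa using hj

-- ===== VERDICT =====
theorem identify_dharmic_conflicts_spec : Claim_equal_identify_dharmic_conflicts := by
  intro query _
  unfold Spec_identify_dharmic_conflicts identify_dharmic_conflicts identify_dharmic_conflicts_alt
  simp only [dharmaMessages, PySem.List.enumerate_cons, PySem.List.enumerate_nil,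
    List.filter_cons, List.filter_nil]
  set q := PySem.Str.lower query with hq
  set fired := (PySem.List.pyRange 0 (PySem.Str.len q) 1).foldl
      (fun fd i => dharmaKeywordGroups.foldl
        (fun fd p =>
          if PySem.Chars.startswith (q.toList.drop i.toNat) p.1.toList then PySem.Set.add fd p.2 else fd)
        fd)
      PySem.Set.empty with hfdef
  have hfired : ∀ g : Int,
      g ∈ fired
      ↔ ∃ p ∈ dharmaKeywordGroups, PySem.Chars.isIn p.1.toList q.toList = true ∧ g = p.2 := by
    intro g
    rw [hfdef, dharma_outer_mem]
    simp only [PySem.Set.empty, List.not_mem_nil, false_or]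
    constructor
    · rintro ⟨i, _, p, hp, hs, hg⟩
      refine ⟨p, hp, ?_, hg⟩
      rw [← PySem.Chars.exists_prefix_drop_iff_isIn]
      exact ⟨i.toNat, (PySem.Chars.startswith_iff _ _).mp hs⟩
    · rintro ⟨p, hp, hin, hg⟩
      have hne : p.1.toList ≠ [] := by
        fin_cases hp <;> simp
      have hlen : PySem.Str.len q = (q.toList.length : Int) := by
        simp [PySem.Str.len]
      rw [hlen] at *
      obtain ⟨i, hi, hs⟩ := (dharma_exists_start_iff q.toList p.1.toList hne).mpr hin
      exact ⟨i, hi, p, hp, hs, hg⟩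
  have hc : ∀ (k : Int) (ws : List String),
      (∀ w, w ∈ ws ↔ (w, k) ∈ dharmaKeywordGroups) →
      PySem.Set.contains fired k = ws.any (fun w => PySem.Str.isIn w q) := by
    intro k ws hws
    rw [Bool.eq_iff_iff, PySem.Set.contains_iff, hfired k, List.any_eq_true]
    constructor
    · rintro ⟨p, hp, hin, rfl⟩
      exact ⟨p.1, (hws p.1).mpr hp, by simpa using hin⟩
    · rintro ⟨w, hw, hin⟩
      exact ⟨(w, k), (hws w).mp hw, by simpa using hin, rfl⟩
  have e0 := hc 0 ["family", "work", "duty"] (by intro w; simp [dharmaKeywordGroups])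
  have e1 := hc (0 + 1) ["truth", "lie", "honest"] (by intro w; simp [dharmaKeywordGroups])
  have e2 := hc (0 + 1 + 1) ["money", "wealth", "profit"] (by intro w; simp [dharmaKeywordGroups])
  have e3 := hc (0 + 1 + 1 + 1) ["friend", "loyalty", "relationship"] (by intro w; simp [dharmaKeywordGroups])
  simp only [e0, e1, e2, e3]
  generalize (["family", "work", "duty"].any fun w => PySem.Str.isIn w q) = b0
  generalize (["truth", "lie", "honest"].any fun w => PySem.Str.isIn w q) = b1
  generalize (["money", "wealth", "profit"].any fun w => PySem.Str.isIn w q) = b2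
  generalize (["friend", "loyalty", "relationship"].any fun w => PySem.Str.isIn w q) = b3
  cases b0 <;> cases b1 <;> cases b2 <;> cases b3 <;> rfl
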